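-- pv_equiv track=rewrite | github.com/HU-TI-DEV/TI-S3 | programma/DrawioProgrammaNaarMd.py | VerwijderLeadingSpaties
-- ===== SOURCE A (Python) =====
-- def VerwijderLeadingSpaties(lst):
--     lstOut=list()
--     for tuple in lst:
--         str = tuple[1]
--         while str.startswith("&nbsp;"):
--             str = str.replace("&nbsp;", "", 1).lstrip()
--         lstOut.append((tuple[0],str))
--     return lstOut
-- ===== SOURCE B (Python) =====
-- def _lead(s):
--     # index just past the leading run of "&nbsp;" tokens, each followed by optional whitespace
--     i = 0
--     while s.startswith("&nbsp;", i):
--         i += 6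
--         while i < len(s) and s[i].isspace():
--             i += 1
--     return i
--
-- def VerwijderLeadingSpaties(lst):
--     return [(t[0], t[1][_lead(t[1]):]) for t in lst]
-- ===== Notes on version B (the rewrite author's own statement) =====
-- stated objective: alternative
-- what changed: B replaces A's repeated string rebuilding (replace+lstrip creating a new string per &nbsp; token) by a single index-based forward scan over the original string, taking one final slice.
import Mathlib
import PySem

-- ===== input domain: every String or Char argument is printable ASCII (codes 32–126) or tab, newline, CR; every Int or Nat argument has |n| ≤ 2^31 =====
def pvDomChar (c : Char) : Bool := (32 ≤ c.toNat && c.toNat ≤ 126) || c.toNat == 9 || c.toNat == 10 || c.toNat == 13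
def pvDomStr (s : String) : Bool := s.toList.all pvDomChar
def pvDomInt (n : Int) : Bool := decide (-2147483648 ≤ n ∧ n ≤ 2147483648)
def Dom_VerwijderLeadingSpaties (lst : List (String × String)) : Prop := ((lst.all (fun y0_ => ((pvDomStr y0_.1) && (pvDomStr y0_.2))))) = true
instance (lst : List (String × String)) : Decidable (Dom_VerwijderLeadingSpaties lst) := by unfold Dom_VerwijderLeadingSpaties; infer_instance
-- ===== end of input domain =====

-- B replaces A's repeated string rebuilding (replace + lstrip per "&nbsp;" token) by one
-- index-based forward scan over the original string followed by a single slice (alternative).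


-- ===== PORT A =====
def pvNbsp : List Char := ['&', 'n', 'b', 's', 'p', ';']

-- hand port of Python `s.replace(old, "", 1)` (remove the first occurrence of `old`);
-- exact: Python removes the occurrence located by str.find, here PySem.Chars.find.
def pvReplaceFirstEmpty (s old : List Char) : List Char :=
  let i := PySem.Chars.find s old
  if i = -1 then s
  else s.take i.toNat ++ s.drop (i.toNat + old.length)

-- the inner `while str.startswith("&nbsp;"): str = str.replace("&nbsp;", "", 1).lstrip()`;
-- the fuel argument only makes the recursion structural: each iteration removes at least 6
-- characters, so fuel `s.length` is never exhausted.
def pvStripLoopGo : Nat → List Char → List Char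
  | 0, s => s
  | fuel + 1, s =>
    if PySem.Chars.startswith s pvNbsp then
      pvStripLoopGo fuel (PySem.Chars.lstrip (pvReplaceFirstEmpty s pvNbsp))
    else s

def pvStripLoop (s : List Char) : List Char := pvStripLoopGo s.length s

def VerwijderLeadingSpaties (lst : List (String × String)) : List (String × String) :=
  lst.foldl (fun lstOut t => lstOut ++ [(t.1, String.ofList (pvStripLoop t.2.toList))]) []

-- ===== PORT B =====
def pvNbspAlt : List Char := ['&', 'n', 'b', 's', 'p', ';']

-- the inner `while i < len(s) and s[i].isspace(): i += 1`; fuel only for totality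
-- (i grows by 1 and stops at len(s), so fuel `s.length` is never exhausted)
def pvWsSkipGo : Nat → List Char → Nat → Nat
  | 0, _, i => i
  | fuel + 1, s, i =>
    if h : i < s.length then
      if PySem.Chars.isspace s[i] then pvWsSkipGo fuel s (i + 1) else i
    else i

def pvWsSkip (s : List Char) (i : Nat) : Nat := pvWsSkipGo s.length s i

-- the outer `while s.startswith("&nbsp;", i)` loop of `_lead`; `s.startswith(p, i)` is ported
-- as startswith on `s.drop i` (exact for i ≥ 0); fuel only for totality (i grows by ≥ 6)
def pvScanGo : Nat → List Char → Nat → Nat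
  | 0, _, i => i
  | fuel + 1, s, i =>
    if PySem.Chars.startswith (s.drop i) pvNbspAlt then
      pvScanGo fuel s (pvWsSkip s (i + 6))
    else i

def pvScan (s : List Char) (i : Nat) : Nat := pvScanGo s.length s i

def VerwijderLeadingSpaties_alt (lst : List (String × String)) : List (String × String) :=
  lst.map (fun t => (t.1, String.ofList (t.2.toList.drop (pvScan t.2.toList 0))))

-- ===== PRECONDITION & SPEC =====
def Spec_VerwijderLeadingSpaties (lst : List (String × String)) (out : List (String × String)) : Prop := out = VerwijderLeadingSpaties_alt lst
instance (lst : List (String × String)) (out : List (String × String)) : Decidable (Spec_VerwijderLeadingSpaties lst out) := by unfold Spec_VerwijderLeadingSpaties; infer_instance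

-- ===== CLAIM (what is proved, stated in full; the proofs are below) =====
def Claim_equal_VerwijderLeadingSpaties : Prop := ∀ (lst : List (String × String)), Dom_VerwijderLeadingSpaties lst → Spec_VerwijderLeadingSpaties lst (VerwijderLeadingSpaties lst)

-- ===== LEMMAS AND PROOFS =====

lemma pvWsSkipGo_ge (f : Nat) (s : List Char) (i : Nat) : i ≤ pvWsSkipGo f s i := by
  induction f generalizing i with
  | zero => simp [pvWsSkipGo]
  | succ f ih =>
    rw [pvWsSkipGo]
    split_ifs with h1 h2
    · exact le_trans (by omega) (ih (i + 1))
    · exact le_refl i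
    · exact le_refl i

lemma pvWsSkipGo_dropWhile (s : List Char) (f i : Nat) (hf : s.length - i ≤ f) :
    List.dropWhile PySem.Chars.isspace (s.drop i) = s.drop (pvWsSkipGo f s i) := by
  induction f generalizing i with
  | zero =>
    rw [pvWsSkipGo, List.drop_eq_nil_of_le (by omega), List.dropWhile_nil]
  | succ f ih =>
    rw [pvWsSkipGo]
    by_cases h1 : i < s.length
    · rw [dif_pos h1]
      by_cases h2 : PySem.Chars.isspace s[i]
      · rw [if_pos h2, List.drop_eq_getElem_cons h1, List.dropWhile_cons_of_pos h2]
        exact ih (i + 1) (by omega)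
      · rw [if_neg h2, List.drop_eq_getElem_cons h1, List.dropWhile_cons_of_neg h2]
    · rw [dif_neg h1, List.drop_eq_nil_of_le (by omega), List.dropWhile_nil]

lemma pvWsSkip_dropWhile (s : List Char) (i : Nat) :
    List.dropWhile PySem.Chars.isspace (s.drop i) = s.drop (pvWsSkip s i) :=
  pvWsSkipGo_dropWhile s s.length i (by omega)

lemma pvReplaceFirst_prefix (t : List Char) (hp : pvNbsp <+: t) :
    pvReplaceFirstEmpty t pvNbsp = t.drop 6 := by
  have hfind : PySem.Chars.find t pvNbsp = 0 := by
    have hnn : 0 ≤ PySem.Chars.find t pvNbsp :=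
      (PySem.Chars.find_nonneg_iff t pvNbsp).mpr hp.isInfix
    have hspec := PySem.Chars.find_spec hnn
    have : (PySem.Chars.find t pvNbsp).toNat = 0 := by
      by_contra hne
      exact hspec.2 0 (Nat.pos_of_ne_zero hne) (by simpa using hp)
    omega
  simp only [pvNbsp] at hfind
  simp [pvReplaceFirstEmpty, pvNbsp, hfind]

lemma pvStripLoopGo_eq_scanGo (s : List Char) (f i : Nat) (hf : s.length - i ≤ f) :
    pvStripLoopGo f (s.drop i) = s.drop (pvScanGo f s i) := by
  induction f generalizing i with
  | zero => rw [pvStripLoopGo, pvScanGo]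
  | succ f ih =>
    rw [pvStripLoopGo, pvScanGo]
    by_cases h : PySem.Chars.startswith (s.drop i) pvNbspAlt
    · have h' : PySem.Chars.startswith (s.drop i) pvNbsp = true := by
        simpa [pvNbsp, pvNbspAlt] using h
      rw [if_pos h, if_pos h']
      have hp : pvNbsp <+: s.drop i := (PySem.Chars.startswith_iff _ _).mp h'
      have h6 : i + 6 ≤ s.length := by
        have := hp.length_le
        simp [pvNbsp] at this
        omega
      rw [pvReplaceFirst_prefix _ hp, List.drop_drop]
      simp only [PySem.Chars.lstrip]
      rw [pvWsSkip_dropWhile s (i + 6)]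
      have hge : i + 6 ≤ pvWsSkip s (i + 6) := pvWsSkipGo_ge s.length s (i + 6)
      exact ih (pvWsSkip s (i + 6)) (by omega)
    · have h' : ¬ PySem.Chars.startswith (s.drop i) pvNbsp = true := by
        simpa [pvNbsp, pvNbspAlt] using h
      rw [if_neg h, if_neg h']

-- ===== VERDICT (by name: the statement is the Claim_ definition above) =====
theorem VerwijderLeadingSpaties_spec : Claim_equal_VerwijderLeadingSpaties := by
  intro lst _
  unfold Spec_VerwijderLeadingSpaties VerwijderLeadingSpaties VerwijderLeadingSpaties_alt
  rw [PySem.List.foldl_append_singleton_eq_map]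
  apply List.map_congr_left
  intro t _
  have h0 := pvStripLoopGo_eq_scanGo t.2.toList t.2.toList.length 0 (by omega)
  simp only [List.drop_zero] at h0
  rw [pvStripLoop, pvScan, h0]
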